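-- pv_equiv track=rewrite | github.com/cvr-bhupalreddy/dsa-python-2025 | DSA/DP/DP_MCM/7.PartitionArray_Max_Sum.py | maxSumSpaceOpt
-- ===== SOURCE A (Python) =====
-- from typing import List
--
-- def maxSumSpaceOpt(arr: List[int], k: int) -> int:
--     n = len(arr)
--     dp = [0]*(k+1)  # only need last k values
--
--     for i in range(1, n+1):
--         curr_max = 0
--         max_val = 0
--         for l in range(1, min(k, i)+1):
--             curr_max = max(curr_max, arr[i-l])
--             max_val = max(max_val, dp[(i-l) % (k+1)] + curr_max*l)
--         dp[i % (k+1)] = max_val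
--
--     return dp[n % (k+1)]
-- ===== SOURCE B (Python) =====
-- from typing import List
--
-- def maxSumSpaceOpt(arr: List[int], k: int) -> int:
--     # Top-down memoized recursion over suffixes: solve(start) = best score
--     # for arr[start:], decomposing by the FIRST segment (length 1..k).
--     # (A iterates bottom-up over prefixes with a rolling buffer, decomposing
--     # by the last segment.)  The seeding loop warms the memo back-to-front
--     # so the recursion depth stays O(1).
--     n = len(arr)
--     memo = {}
--
--     def solve(start: int) -> int:
--         if start in memo:
--             return memo[start]
--         curr_max = 0
--         best = 0
--         for l in range(1, min(k, n - start) + 1):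
--             curr_max = max(curr_max, arr[start + l - 1])
--             best = max(best, curr_max * l + solve(start + l))
--         memo[start] = best
--         return best
--
--     for start in range(n, -1, -1):
--         solve(start)
--     return solve(0)
-- ===== Notes on version B (the rewrite author's own statement) =====
-- stated objective: alternative
-- what changed: Replaces A's bottom-up iterative DP over prefixes (last-segment recurrence, rolling (k+1)-slot modular buffer) with a top-down memoized recursion over suffixes (first-segment recurrence, dict memo seeded back-to-front): recursive vs iterative decomposition and the opposite traversal direction; same recurrence values, proved equal via a first-vs-last-segment exchange lemma.
import Mathlib
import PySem

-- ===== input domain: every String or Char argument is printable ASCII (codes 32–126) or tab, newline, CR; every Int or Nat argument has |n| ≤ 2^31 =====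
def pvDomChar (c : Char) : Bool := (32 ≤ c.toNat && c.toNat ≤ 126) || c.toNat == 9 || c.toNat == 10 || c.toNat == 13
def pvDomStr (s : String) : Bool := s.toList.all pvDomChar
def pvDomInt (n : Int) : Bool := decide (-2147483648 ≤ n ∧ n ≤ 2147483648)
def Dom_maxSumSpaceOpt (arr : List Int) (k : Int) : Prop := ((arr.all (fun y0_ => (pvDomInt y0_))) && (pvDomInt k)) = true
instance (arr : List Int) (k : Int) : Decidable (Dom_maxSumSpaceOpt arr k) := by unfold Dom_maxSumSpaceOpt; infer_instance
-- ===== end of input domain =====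

-- B replaces A's bottom-up iterative prefix DP (last-segment recurrence, rolling (k+1)-slot
-- modular buffer) with a top-down memoized recursion over suffixes (first-segment recurrence);
-- same O(n*k) cost ("alternative" objective, no speed claim).


-- ===== PORT A =====
def maxSumSpaceOpt (arr : List Int) (k : Int) : Int :=
  let n : Int := PySem.List.len arr
  let dp : List Int := List.replicate (k + 1).toNat 0
  let dp := (PySem.List.pyRange 1 (n + 1) 1).foldl (fun dp i =>
    let st := (PySem.List.pyRange 1 (min k i + 1) 1).foldl (fun (st : Int × Int) l =>
      let currMax := max st.1 (PySem.List.pyGetD arr (i - l) 0)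
      let maxVal := max st.2 (PySem.List.pyGetD dp (PySem.Int.mod (i - l) (k + 1)) 0 + currMax * l)
      (currMax, maxVal)) (0, 0)
    PySem.List.pySetD dp (PySem.Int.mod i (k + 1)) st.2) dp
  PySem.List.pyGetD dp (PySem.Int.mod n (k + 1)) 0

-- ===== PORT B =====
-- Source B's memoized recursion solve(start) over suffixes, ported as a fuel-indexed recursion
-- (the memo dict and its back-to-front warming loop only speed evaluation up; the fuel
-- n + 1 is enough for every reachable call, so values are those of the Python recursion).
def solveB (arr : List Int) (k : Int) : Nat → Int → Int
  | 0, _ => 0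
  | fuel + 1, start =>
    ((PySem.List.pyRange 1 (min k (PySem.List.len arr - start) + 1) 1).foldl
      (fun (st : Int × Int) l =>
        let currMax := max st.1 (PySem.List.pyGetD arr (start + l - 1) 0)
        let best := max st.2 (currMax * l + solveB arr k fuel (start + l))
        (currMax, best)) (0, 0)).2

def maxSumSpaceOpt_alt (arr : List Int) (k : Int) : Int :=
  solveB arr k (arr.length + 1) 0

-- ===== PRECONDITION & SPEC =====
-- Pre_ excludes exactly k < 0, where A raises (ZeroDivisionError for k = -1, IndexError otherwise).
def Pre_maxSumSpaceOpt (arr : List Int) (k : Int) : Prop := 0 ≤ k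
instance (arr : List Int) (k : Int) : Decidable (Pre_maxSumSpaceOpt arr k) := by unfold Pre_maxSumSpaceOpt; infer_instance
def pvWitness_maxSumSpaceOpt : List Int × Int := ([3, -2, 7, 1], 2)

def Spec_maxSumSpaceOpt (arr : List Int) (k : Int) (out : Int) : Prop := out = maxSumSpaceOpt_alt arr k
instance (arr : List Int) (k : Int) (out : Int) : Decidable (Spec_maxSumSpaceOpt arr k out) := by unfold Spec_maxSumSpaceOpt; infer_instance

-- ===== CLAIM (what is proved, stated in full; the proofs are below) =====
def Claim_equal_maxSumSpaceOpt : Prop := ∀ (arr : List Int) (k : Int), Dom_maxSumSpaceOpt arr k → Pre_maxSumSpaceOpt arr k → Spec_maxSumSpaceOpt arr k (maxSumSpaceOpt arr k)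


-- ===== LEMMAS AND PROOFS =====

-- clamped-at-0 maximum of arr[s:j]
def segMax (arr : List Int) (s j : Nat) : Int := ((arr.drop s).take (j - s)).foldl max 0

-- the value A's inner loop accumulates: candidates for the last segment of arr[:j], scanned leftwards
def pullVal (arr : List Int) (r : Nat → Int) (j : Nat) : Nat → Int
  | 0 => 0
  | m + 1 => max (pullVal arr r j m)
      (r (j - (m + 1)) + segMax arr (j - (m + 1)) j * ((m : Int) + 1))

-- fuelled form of A's optimum for prefixes (last-segment recurrence)
def gfunF (arr : List Int) (k : Int) : Nat → Nat → Int
  | 0, _ => 0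
  | fuel + 1, j => pullVal arr (gfunF arr k fuel) j ((min k (j : Int)).toNat)

-- gfun arr k j = best partition score of the prefix arr[:j], split off the LAST segment
def gfun (arr : List Int) (k : Int) (j : Nat) : Int := gfunF arr k j j

-- max over a list of candidates, clamped at 0
def max0 (L : List Int) : Int := L.foldl max 0

-- fuelled optimum for the slice arr[s:j], split off the FIRST segment (B's recurrence)
def optF (arr : List Int) (k : Int) : Nat → Nat → Nat → Int
  | 0, _, _ => 0
  | d + 1, s, j =>
    max0 ((List.range' 1 (min k ((j : Int) - (s : Int))).toNat).map
      (fun f => segMax arr s (s + f) * (f : Int) + optF arr k d (s + f) j))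

def OptV (arr : List Int) (k : Int) (s j : Nat) : Int := optF arr k (j - s) s j

lemma foldl_max_out (t : List Int) (a x : Int) :
    t.foldl max (max a x) = max (t.foldl max a) x := by
  induction t generalizing a with
  | nil => rfl
  | cons y t ih =>
    simp only [List.foldl_cons]
    rw [show max (max a x) y = max (max a y) x by
      simp [max_comm, max_left_comm], ih]

lemma le_foldl_max (L : List Int) : ∀ a : Int, a ≤ L.foldl max a := by
  induction L with
  | nil => intro a; exact le_refl a
  | cons y t ih =>
    intro a
    exact le_trans (le_max_left a y) (ih (max a y))

lemma mem_le_foldl_max (L : List Int) (x : Int) : ∀ a : Int, x ∈ L → x ≤ L.foldl max a := by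
  induction L with
  | nil => intro a h; cases h
  | cons y t ih =>
    intro a h
    rcases List.mem_cons.mp h with rfl | h
    · exact le_trans (le_max_right a x) (le_foldl_max t (max a x))
    · exact ih (max a y) h

lemma foldl_max_le (L : List Int) (c : Int) : ∀ a : Int, a ≤ c → (∀ x ∈ L, x ≤ c) → L.foldl max a ≤ c := by
  induction L with
  | nil => intro a ha _; exact ha
  | cons y t ih =>
    intro a ha h
    exact ih (max a y) (max_le ha (h y (List.mem_cons_self))) (fun x hx => h x (List.mem_cons_of_mem y hx))

lemma max0_nonneg (L : List Int) : 0 ≤ max0 L := le_foldl_max L 0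

lemma mem_le_max0 (L : List Int) (x : Int) (h : x ∈ L) : x ≤ max0 L := mem_le_foldl_max L x 0 h

lemma max0_le (L : List Int) (c : Int) (hc : 0 ≤ c) (h : ∀ x ∈ L, x ≤ c) : max0 L ≤ c :=
  foldl_max_le L c 0 hc h

lemma max0_concat (L : List Int) (x : Int) : max0 (L ++ [x]) = max (max0 L) x := by
  simp [max0, List.foldl_append]

lemma segMax_nonneg (arr : List Int) (s j : Nat) : 0 ≤ segMax arr s j := le_foldl_max _ 0

lemma segMax_self (arr : List Int) (s : Nat) : segMax arr s s = 0 := by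
  simp [segMax]

lemma segMax_left (arr : List Int) (s j : Nat) (h1 : s < j) (h2 : s < arr.length) :
    segMax arr s j = max (segMax arr (s + 1) j) (arr.getD s 0) := by
  unfold segMax
  rw [List.drop_eq_getElem_cons h2]
  rw [show j - s = (j - (s + 1)) + 1 by omega, List.take_succ_cons, List.foldl_cons]
  rw [foldl_max_out, List.getD_eq_getElem arr 0 h2]

lemma segMax_right (arr : List Int) (s j : Nat) (h1 : s ≤ j) (h2 : j < arr.length) :
    segMax arr s (j + 1) = max (segMax arr s j) (arr.getD j 0) := by
  unfold segMax
  rw [show j + 1 - s = (j - s) + 1 by omega, List.take_add_one, List.foldl_append]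
  have hg : (arr.drop s)[j - s]? = some arr[j] := by
    rw [List.getElem?_drop]
    rw [show s + (j - s) = j by omega, List.getElem?_eq_getElem h2]
  rw [hg, List.getD_eq_getElem arr 0 h2]
  rfl

lemma pullVal_congr (arr : List Int) (r r' : Nat → Int) (j m : Nat)
    (h : ∀ t < m, r (j - (t + 1)) = r' (j - (t + 1))) :
    pullVal arr r j m = pullVal arr r' j m := by
  induction m with
  | zero => rfl
  | succ m ih =>
    simp only [pullVal]
    rw [ih (fun t ht => h t (Nat.lt_succ_of_lt ht)), h m (Nat.lt_succ_self m)]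

lemma min_toNat_le (k : Int) (j : Nat) : (min k (j : Int)).toNat ≤ j := by
  omega

lemma gfunF_zero (arr : List Int) (k : Int) (fuel : Nat) : gfunF arr k fuel 0 = 0 := by
  cases fuel with
  | zero => rfl
  | succ fuel =>
    have h0 : (min k (0 : Int)).toNat = 0 := by omega
    show pullVal arr (gfunF arr k fuel) 0 (min k ((0:Nat):Int)).toNat = 0
    rw [Nat.cast_zero, h0]; rfl

lemma gfunF_eq (arr : List Int) (k : Int) :
    ∀ (j f1 f2 : Nat), j ≤ f1 → j ≤ f2 → gfunF arr k f1 j = gfunF arr k f2 j := by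
  intro j
  induction j using Nat.strong_induction_on with
  | _ j ih =>
    intro f1 f2 h1 h2
    match j, f1, f2 with
    | 0, f1, f2 => rw [gfunF_zero, gfunF_zero]
    | j + 1, f1 + 1, f2 + 1 =>
      simp only [gfunF]
      apply pullVal_congr
      intro t ht
      have hm := min_toNat_le k (j + 1)
      have harg : j + 1 - (t + 1) < j + 1 := by omega
      exact ih _ harg f1 f2 (by omega) (by omega)

lemma gfun_unfold (arr : List Int) (k : Int) (j : Nat) :
    gfun arr k j = pullVal arr (gfun arr k) j ((min k (j : Int)).toNat) := by
  cases j with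
  | zero =>
    have h0 : (min k (0 : Int)).toNat = 0 := by omega
    show gfunF arr k 0 0 = pullVal arr (gfun arr k) 0 (min k ((0:Nat):Int)).toNat
    rw [Nat.cast_zero, h0]; rfl
  | succ j =>
    show gfunF arr k (j + 1) (j + 1) = _
    simp only [gfunF]
    apply pullVal_congr
    intro t ht
    have hm := min_toNat_le k (j + 1)
    exact gfunF_eq arr k _ _ _ (by omega) (by omega)

lemma optF_nonneg (arr : List Int) (k : Int) : ∀ (d s j : Nat), 0 ≤ optF arr k d s j := by
  intro d s j
  cases d with
  | zero => exact le_refl 0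
  | succ d => exact max0_nonneg _

lemma optV_nonneg (arr : List Int) (k : Int) (s j : Nat) : 0 ≤ OptV arr k s j :=
  optF_nonneg arr k _ s j

lemma optV_zero (arr : List Int) (k : Int) (s j : Nat) (h : j ≤ s) : OptV arr k s j = 0 := by
  unfold OptV
  rw [Nat.sub_eq_zero_of_le h]
  rfl

lemma optF_eq (arr : List Int) (k : Int) :
    ∀ (f1 s j f2 : Nat), j - s ≤ f1 → j - s ≤ f2 → optF arr k f1 s j = optF arr k f2 s j := by
  intro f1
  induction f1 with
  | zero =>
    intro s j f2 h1 h2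
    cases f2 with
    | zero => rfl
    | succ g =>
      have hM : (min k ((j : Int) - (s : Int))).toNat = 0 := by omega
      show (0 : Int) = optF arr k (g + 1) s j
      simp only [optF]
      rw [hM]
      rfl
  | succ f ih =>
    intro s j f2 h1 h2
    cases f2 with
    | zero =>
      have hM : (min k ((j : Int) - (s : Int))).toNat = 0 := by omega
      show optF arr k (f + 1) s j = (0 : Int)
      simp only [optF]
      rw [hM]
      rfl
    | succ g =>
      simp only [optF]
      congr 1
      apply List.map_congr_left
      intro x hx
      rw [List.mem_range'_1] at hx
      have hMle : (min k ((j : Int) - (s : Int))).toNat ≤ j - s := by omega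
      rw [ih (s + x) j g (by omega) (by omega)]

lemma opt_firstseg (arr : List Int) (k : Int) (s j : Nat) :
    OptV arr k s j = max0 ((List.range' 1 (min k ((j : Int) - (s : Int))).toNat).map
      (fun f => segMax arr s (s + f) * (f : Int) + OptV arr k (s + f) j)) := by
  unfold OptV
  by_cases hle : j ≤ s
  · have hM : (min k ((j : Int) - (s : Int))).toNat = 0 := by omega
    rw [Nat.sub_eq_zero_of_le hle, hM]
    rfl
  · have hD : j - s = (j - s - 1) + 1 := by omega
    rw [hD]
    simp only [optF]
    congr 1
    apply List.map_congr_left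
    intro x hx
    rw [List.mem_range'_1] at hx
    have hMle : (min k ((j : Int) - (s : Int))).toNat ≤ j - s := by omega
    congr 1
    exact optF_eq arr k (j - s - 1) (s + x) j (j - (s + x)) (by omega) (by omega)

-- the first-vs-last-segment exchange: B's suffix recurrence also satisfies A's prefix recurrence
lemma opt_lastseg_aux (arr : List Int) (k : Int) :
    ∀ (d s j : Nat), j - s ≤ d →
    OptV arr k s j = max0 ((List.range' 1 (min k ((j : Int) - (s : Int))).toNat).map
      (fun l => OptV arr k s (j - l) + segMax arr (j - l) j * (l : Int))) := by
  intro d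
  induction d with
  | zero =>
    intro s j h
    have hM : (min k ((j : Int) - (s : Int))).toNat = 0 := by omega
    rw [optV_zero arr k s j (by omega), hM]
    rfl
  | succ d ih =>
    intro s j hd
    set M := (min k ((j : Int) - (s : Int))).toNat with hM
    by_cases hM0 : M = 0
    · rw [opt_firstseg, ← hM, hM0]
      rfl
    · have hMI : (M : Int) = min k ((j : Int) - (s : Int)) := by omega
      have hMk : (M : Int) ≤ k := by omega
      have hMD : s + M ≤ j := by omega
      have hk1 : (1 : Int) ≤ k := by omega
      have hsj : s < j := by omega
      apply le_antisymm
      · -- first-seg expansion ≤ RHS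
        rw [opt_firstseg, ← hM]
        apply max0_le _ _ (max0_nonneg _)
        intro x hx
        rw [List.mem_map] at hx
        obtain ⟨f, hf, rfl⟩ := hx
        rw [List.mem_range'_1] at hf
        by_cases hfD : s + f = j
        · -- whole-slice segment: equals the RHS entry at l = f
          have h1 : OptV arr k (s + f) j = 0 := optV_zero arr k (s + f) j (by omega)
          have h2 : OptV arr k s (j - f) = 0 := optV_zero arr k s (j - f) (by omega)
          have h3 : j - f = s := by omega
          have heq : segMax arr s (s + f) * (f : Int) + OptV arr k (s + f) j
              = OptV arr k s (j - f) + segMax arr (j - f) j * (f : Int) := by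
            rw [h1, h2, h3, hfD]; ring
          rw [heq]
          exact mem_le_max0 _ _ (List.mem_map.2 ⟨f, List.mem_range'_1.2 ⟨hf.1, hf.2⟩, rfl⟩)
        · -- proper first segment: expand the tail by the induction hypothesis
          have hsfj : s + f < j := by omega
          rw [ih (s + f) j (by omega)]
          set M2 := (min k ((j : Int) - ((s + f : Nat) : Int))).toNat with hM2
          have hM2I : (M2 : Int) = min k ((j : Int) - ((s + f : Nat) : Int)) := by
            push_cast; omega
          push_cast at hM2I
          have hM2pos : 1 ≤ M2 := by omega
          have key1 : ∀ l, 1 ≤ l → l ≤ M2 →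
              segMax arr s (s + f) * (f : Int) + (OptV arr k (s + f) (j - l) + segMax arr (j - l) j * (l : Int))
                ≤ max0 ((List.range' 1 M).map
                  (fun l => OptV arr k s (j - l) + segMax arr (j - l) j * (l : Int))) := by
            intro l hl1 hl2
            have step1 : segMax arr s (s + f) * (f : Int) + OptV arr k (s + f) (j - l)
                ≤ OptV arr k s (j - l) := by
              rw [opt_firstseg arr k s (j - l)]
              apply mem_le_max0
              apply List.mem_map.2
              refine ⟨f, List.mem_range'_1.2 ⟨hf.1, ?_⟩, rfl⟩
              have hfle : f ≤ (min k (((j - l : Nat) : Int) - (s : Int))).toNat := by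
                push_cast; omega
              omega
            have step2 : OptV arr k s (j - l) + segMax arr (j - l) j * (l : Int)
                ≤ max0 ((List.range' 1 M).map
                  (fun l => OptV arr k s (j - l) + segMax arr (j - l) j * (l : Int))) := by
              apply mem_le_max0
              apply List.mem_map.2
              exact ⟨l, List.mem_range'_1.2 ⟨hl1, by omega⟩, rfl⟩
            calc segMax arr s (s + f) * (f : Int) + (OptV arr k (s + f) (j - l) + segMax arr (j - l) j * (l : Int))
                = (segMax arr s (s + f) * (f : Int) + OptV arr k (s + f) (j - l)) + segMax arr (j - l) j * (l : Int) := by ring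
              _ ≤ OptV arr k s (j - l) + segMax arr (j - l) j * (l : Int) := by linarith [step1]
              _ ≤ _ := step2
          have h0 : 0 ≤ OptV arr k (s + f) (j - M2) + segMax arr (j - M2) j * (M2 : Int) := by
            have ha := optV_nonneg arr k (s + f) (j - M2)
            have hb := mul_nonneg (segMax_nonneg arr (j - M2) j) (Int.natCast_nonneg M2)
            linarith
          have hAf : segMax arr s (s + f) * (f : Int)
              ≤ max0 ((List.range' 1 M).map
                (fun l => OptV arr k s (j - l) + segMax arr (j - l) j * (l : Int))) := by
            have hc := key1 M2 hM2pos le_rfl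
            linarith
          have hrest : max0 ((List.range' 1 M2).map
              (fun l => OptV arr k (s + f) (j - l) + segMax arr (j - l) j * (l : Int)))
              ≤ max0 ((List.range' 1 M).map
                (fun l => OptV arr k s (j - l) + segMax arr (j - l) j * (l : Int)))
                - segMax arr s (s + f) * (f : Int) := by
            apply max0_le
            · linarith
            · intro x hx
              rw [List.mem_map] at hx
              obtain ⟨l, hl, rfl⟩ := hx
              rw [List.mem_range'_1] at hl
              have hc := key1 l hl.1 (by omega)
              linarith
          linarith
      · -- RHS ≤ first-seg optimum
        apply max0_le _ _ (optV_nonneg arr k s j)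
        intro x hx
        rw [List.mem_map] at hx
        obtain ⟨l, hl, rfl⟩ := hx
        rw [List.mem_range'_1] at hl
        by_cases hlD : j - l ≤ s
        · -- whole-slice segment: equals the first-seg entry at f = l
          have h2 : OptV arr k s (j - l) = 0 := optV_zero arr k s (j - l) hlD
          have h3 : j - l = s := by omega
          have h4 : s + l = j := by omega
          have h1 : OptV arr k (s + l) j = 0 := optV_zero arr k (s + l) j (by omega)
          have heq : OptV arr k s (j - l) + segMax arr (j - l) j * (l : Int)
              = segMax arr s (s + l) * (l : Int) + OptV arr k (s + l) j := by
            rw [h1, h2, h3, h4]; ring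
          rw [heq, opt_firstseg arr k s j, ← hM]
          exact mem_le_max0 _ _ (List.mem_map.2 ⟨l, List.mem_range'_1.2 ⟨hl.1, hl.2⟩, rfl⟩)
        · -- l < j - s: expand OptV s (j-l) by the first segment
          have hlj : l < j - s := by omega
          rw [opt_firstseg arr k s (j - l)]
          set M1 := (min k (((j - l : Nat) : Int) - (s : Int))).toNat with hM1
          have hM1I : (M1 : Int) = min k (((j - l : Nat) : Int) - (s : Int)) := by
            push_cast; omega
          push_cast at hM1I
          have hM1pos : 1 ≤ M1 := by omega
          have key2 : ∀ f, 1 ≤ f → f ≤ M1 →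
              (segMax arr s (s + f) * (f : Int) + OptV arr k (s + f) (j - l)) + segMax arr (j - l) j * (l : Int)
                ≤ OptV arr k s j := by
            intro f hf1 hf2
            have step1 : OptV arr k (s + f) (j - l) + segMax arr (j - l) j * (l : Int)
                ≤ OptV arr k (s + f) j := by
              rw [ih (s + f) j (by omega)]
              apply mem_le_max0
              apply List.mem_map.2
              refine ⟨l, List.mem_range'_1.2 ⟨hl.1, ?_⟩, rfl⟩
              have hlle : l ≤ (min k ((j : Int) - ((s + f : Nat) : Int))).toNat := by
                push_cast; omega
              omega
            have step2 : segMax arr s (s + f) * (f : Int) + OptV arr k (s + f) j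
                ≤ OptV arr k s j := by
              rw [opt_firstseg arr k s j, ← hM]
              apply mem_le_max0
              apply List.mem_map.2
              exact ⟨f, List.mem_range'_1.2 ⟨hf1, by omega⟩, rfl⟩
            calc (segMax arr s (s + f) * (f : Int) + OptV arr k (s + f) (j - l)) + segMax arr (j - l) j * (l : Int)
                = segMax arr s (s + f) * (f : Int) + (OptV arr k (s + f) (j - l) + segMax arr (j - l) j * (l : Int)) := by ring
              _ ≤ segMax arr s (s + f) * (f : Int) + OptV arr k (s + f) j := by linarith [step1]
              _ ≤ _ := step2
          have h0 : 0 ≤ segMax arr s (s + M1) * (M1 : Int) + OptV arr k (s + M1) (j - l) := by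
            have ha := optV_nonneg arr k (s + M1) (j - l)
            have hb := mul_nonneg (segMax_nonneg arr s (s + M1)) (Int.natCast_nonneg M1)
            linarith
          have hBl : segMax arr (j - l) j * (l : Int) ≤ OptV arr k s j := by
            have hc := key2 M1 hM1pos le_rfl
            linarith
          have hrest : max0 ((List.range' 1 M1).map
              (fun f => segMax arr s (s + f) * (f : Int) + OptV arr k (s + f) (j - l)))
              ≤ OptV arr k s j - segMax arr (j - l) j * (l : Int) := by
            apply max0_le
            · linarith
            · intro x hx
              rw [List.mem_map] at hx
              obtain ⟨f, hf, rfl⟩ := hx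
              rw [List.mem_range'_1] at hf
              have hc := key2 f hf.1 (by omega)
              linarith
          linarith

lemma opt_lastseg (arr : List Int) (k : Int) (s j : Nat) :
    OptV arr k s j = max0 ((List.range' 1 (min k ((j : Int) - (s : Int))).toNat).map
      (fun l => OptV arr k s (j - l) + segMax arr (j - l) j * (l : Int))) :=
  opt_lastseg_aux arr k (j - s) s j le_rfl

lemma pullVal_eq_max0 (arr : List Int) (r : Nat → Int) (j : Nat) :
    ∀ m, pullVal arr r j m = max0 ((List.range' 1 m).map
      (fun l => r (j - l) + segMax arr (j - l) j * (l : Int))) := by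
  intro m
  induction m with
  | zero => rfl
  | succ m ih =>
    rw [List.range'_1_concat, List.map_append, List.map_cons, List.map_nil, max0_concat]
    rw [show 1 + m = m + 1 by omega]
    rw [← ih]
    simp only [pullVal]
    push_cast
    ring_nf

-- A's prefix optimum equals B's suffix optimum on the full prefix
lemma gfun_eq_opt (arr : List Int) (k : Int) :
    ∀ j, gfun arr k j = OptV arr k 0 j := by
  intro j
  induction j using Nat.strong_induction_on with
  | _ j ih =>
    rw [gfun_unfold, pullVal_eq_max0]
    have hM : (min k ((j : Int) - ((0 : Nat) : Int))).toNat = (min k (j : Int)).toNat := by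
      push_cast; omega
    rw [opt_lastseg arr k 0 j, hM]
    congr 1
    apply List.map_congr_left
    intro l hl
    rw [List.mem_range'_1] at hl
    have hlj : l ≤ j := by
      have := min_toNat_le k j
      omega
    rw [ih (j - l) (by omega)]

-- ===== A side =====
lemma innerA (arr : List Int) (rd : Int → Int) (i : Nat) (hi : i ≤ arr.length) :
    ∀ m, m ≤ i →
    (PySem.List.pyRange 1 ((m : Int) + 1) 1).foldl (fun (st : Int × Int) l =>
      let currMax := max st.1 (PySem.List.pyGetD arr ((i : Int) - l) 0)
      let maxVal := max st.2 (rd ((i : Int) - l) + currMax * l)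
      (currMax, maxVal)) (0, 0)
    = (segMax arr (i - m) i, pullVal arr (fun s => rd (s : Int)) i m) := by
  intro m
  induction m with
  | zero =>
    intro _
    rw [Nat.cast_zero, zero_add, PySem.List.pyRange_one_eq_nil (le_refl 1)]
    simp [segMax_self, pullVal]
  | succ m ih =>
    intro hm
    have hb : ((m + 1 : Nat) : Int) + 1 = ((m : Int) + 1) + 1 := by push_cast; ring
    rw [hb, PySem.List.pyRange_one_succ_right (by omega : (1 : Int) ≤ (m : Int) + 1),
      List.foldl_append, ih (by omega)]
    simp only [List.foldl_cons, List.foldl_nil]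
    have hidx : (i : Int) - ((m : Int) + 1) = ((i - (m + 1) : Nat) : Int) := by
      have : m + 1 ≤ i := hm
      push_cast [this]
      ring
    rw [hidx, PySem.List.pyGetD_natCast]
    have hseg : max (segMax arr (i - m) i) (arr.getD (i - (m + 1)) 0)
        = segMax arr (i - (m + 1)) i := by
      rw [show i - m = (i - (m + 1)) + 1 by omega]
      exact (segMax_left arr (i - (m + 1)) i (by omega) (by omega)).symm
    show (_, _) = (_, _)
    rw [Prod.mk.injEq]
    refine ⟨hseg, ?_⟩
    show max (pullVal arr (fun s => rd (s : Int)) i m)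
        (rd ((i - (m + 1) : Nat) : Int) + max (segMax arr (i - m) i) (arr.getD (i - (m + 1)) 0) * ((m : Int) + 1))
      = pullVal arr (fun s => rd (s : Int)) i (m + 1)
    rw [hseg]
    rfl
lemma outerA (arr : List Int) (k : Int) (hk : 0 ≤ k) :
    ∀ i, i ≤ arr.length →
    ((PySem.List.pyRange 1 ((i : Int) + 1) 1).foldl (fun dp z =>
      let st := (PySem.List.pyRange 1 (min k z + 1) 1).foldl (fun (st : Int × Int) l =>
        let currMax := max st.1 (PySem.List.pyGetD arr (z - l) 0)
        let maxVal := max st.2 (PySem.List.pyGetD dp (PySem.Int.mod (z - l) (k + 1)) 0 + currMax * l)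
        (currMax, maxVal)) (0, 0)
      PySem.List.pySetD dp (PySem.Int.mod z (k + 1)) st.2) (List.replicate (k.toNat + 1) 0)).length = k.toNat + 1
    ∧ ∀ j, j ≤ i → (i : Int) - (j : Int) ≤ k →
      ((PySem.List.pyRange 1 ((i : Int) + 1) 1).foldl (fun dp z =>
        let st := (PySem.List.pyRange 1 (min k z + 1) 1).foldl (fun (st : Int × Int) l =>
          let currMax := max st.1 (PySem.List.pyGetD arr (z - l) 0)
          let maxVal := max st.2 (PySem.List.pyGetD dp (PySem.Int.mod (z - l) (k + 1)) 0 + currMax * l)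
          (currMax, maxVal)) (0, 0)
        PySem.List.pySetD dp (PySem.Int.mod z (k + 1)) st.2) (List.replicate (k.toNat + 1) 0)).getD (j % (k.toNat + 1)) 0 = gfun arr k j := by
  intro i
  induction i with
  | zero =>
    intro _
    rw [Nat.cast_zero, zero_add, PySem.List.pyRange_one_eq_nil (le_refl 1)]
    simp only [List.foldl_nil]
    refine ⟨List.length_replicate, ?_⟩
    intro j hj _
    have hj0 : j = 0 := by omega
    subst hj0
    rw [Nat.zero_mod, List.getD_eq_getElem?_getD, List.getElem?_replicate]
    simp [gfun, gfunF_zero]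
  | succ i ih =>
    intro hi1
    obtain ⟨hL, hV⟩ := ih (by omega)
    have hb : ((i + 1 : Nat) : Int) + 1 = ((i : Int) + 1) + 1 := by push_cast; ring
    rw [hb, PySem.List.pyRange_one_succ_right (by omega : (1 : Int) ≤ (i : Int) + 1),
      List.foldl_append]
    simp only [List.foldl_cons, List.foldl_nil]
    revert hL hV
    generalize ((PySem.List.pyRange 1 ((i : Int) + 1) 1).foldl (fun dp z =>
      let st := (PySem.List.pyRange 1 (min k z + 1) 1).foldl (fun (st : Int × Int) l =>
        let currMax := max st.1 (PySem.List.pyGetD arr (z - l) 0)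
        let maxVal := max st.2 (PySem.List.pyGetD dp (PySem.Int.mod (z - l) (k + 1)) 0 + currMax * l)
        (currMax, maxVal)) (0, 0)
      PySem.List.pySetD dp (PySem.Int.mod z (k + 1)) st.2) (List.replicate (k.toNat + 1) 0)) = dpi
    intro hL hV
    have hz : ((i : Int) + 1) = ((i + 1 : Nat) : Int) := by push_cast; ring
    rw [hz]
    set m := (min k ((i + 1 : Nat) : Int)).toNat with hm
    have hm' : (m : Int) = min k ((i + 1 : Nat) : Int) := by omega
    have hinner := innerA arr (fun z => PySem.List.pyGetD dpi (PySem.Int.mod z (k + 1)) 0)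
      (i + 1) hi1 m (by omega)
    beta_reduce at hinner
    rw [show min k ((i + 1 : Nat) : Int) + 1 = (m : Int) + 1 by rw [hm'], hinner]
    have hk1 : (k + 1 : Int) = ((k.toNat + 1 : Nat) : Int) := by omega
    have hpull : pullVal arr (fun s => PySem.List.pyGetD dpi (PySem.Int.mod (s : Int) (k + 1)) 0)
        (i + 1) m = pullVal arr (gfun arr k) (i + 1) m := by
      apply pullVal_congr
      intro t ht
      have harg : i + 1 - (t + 1) = i - t := by omega
      rw [harg, hk1, PySem.Int.mod_natCast, PySem.List.pyGetD_natCast]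
      exact hV (i - t) (by omega) (by omega)
    have hg : pullVal arr (gfun arr k) (i + 1) m = gfun arr k (i + 1) := by
      rw [hm]; exact (gfun_unfold arr k (i + 1)).symm
    show (PySem.List.pySetD dpi (PySem.Int.mod ((i+1:Nat):Int) (k + 1)) (pullVal arr
      (fun s => PySem.List.pyGetD dpi (PySem.Int.mod (s : Int) (k + 1)) 0) (i + 1) m)).length = k.toNat + 1 ∧ _
    rw [hpull, hg, hk1, PySem.Int.mod_natCast, PySem.List.pySetD_natCast]
    refine ⟨by rw [List.length_set]; exact hL, ?_⟩
    intro j hj hjk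
    by_cases hji : j = i + 1
    · subst hji
      rw [List.getD_eq_getElem?_getD, List.getElem?_set_self (by rw [hL]; exact Nat.mod_lt _ (by omega))]
      rfl
    · have hne : (i + 1) % (k.toNat + 1) ≠ j % (k.toNat + 1) := by
        intro heq
        have hmod : j ≡ i + 1 [MOD k.toNat + 1] := heq.symm
        have hdvd := hmod.dvd
        have hle : ((k.toNat + 1 : Nat) : Int) ≤ (i + 1 : Int) - (j : Int) :=
          Int.le_of_dvd (by omega) hdvd
        omega
      rw [List.getD_eq_getElem?_getD, List.getElem?_set_ne hne, ← List.getD_eq_getElem?_getD]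
      exact hV j (by omega) (by omega)
lemma portA_eq_gfun (arr : List Int) (k : Int) (hk : 0 ≤ k) :
    maxSumSpaceOpt arr k = gfun arr k arr.length := by
  unfold maxSumSpaceOpt
  simp only [PySem.List.len_eq]
  rw [show (k + 1).toNat = k.toNat + 1 by omega]
  obtain ⟨hL, hV⟩ := outerA arr k hk arr.length le_rfl
  have hread : ∀ xs : List Int, PySem.List.pyGetD xs (PySem.Int.mod ((arr.length : Nat) : Int) (k + 1)) 0
      = xs.getD (arr.length % (k.toNat + 1)) 0 := by
    intro xs
    rw [show (k + 1 : Int) = ((k.toNat + 1 : Nat) : Int) by omega, PySem.Int.mod_natCast,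
      PySem.List.pyGetD_natCast]
  rw [hread]
  exact hV arr.length le_rfl (by omega)

-- ===== B side =====
lemma innerB (arr : List Int) (k : Int) (fuel : Nat) (s : Nat) :
    ∀ m, s + m ≤ arr.length →
    (PySem.List.pyRange 1 ((m : Int) + 1) 1).foldl (fun (st : Int × Int) l =>
      let currMax := max st.1 (PySem.List.pyGetD arr ((s : Int) + l - 1) 0)
      let best := max st.2 (currMax * l + solveB arr k fuel ((s : Int) + l))
      (currMax, best)) (0, 0)
    = (segMax arr s (s + m),
       max0 ((List.range' 1 m).map
         (fun f => segMax arr s (s + f) * (f : Int) + solveB arr k fuel (((s + f : Nat)) : Int)))) := by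
  intro m
  induction m with
  | zero =>
    intro _
    rw [Nat.cast_zero, zero_add, PySem.List.pyRange_one_eq_nil (le_refl 1)]
    simp [segMax_self, max0]
  | succ m ih =>
    intro hm
    have hb : ((m + 1 : Nat) : Int) + 1 = ((m : Int) + 1) + 1 := by push_cast; ring
    rw [hb, PySem.List.pyRange_one_succ_right (by omega : (1 : Int) ≤ (m : Int) + 1),
      List.foldl_append, ih (by omega)]
    simp only [List.foldl_cons, List.foldl_nil]
    rw [List.range'_1_concat, List.map_append, List.map_cons, List.map_nil, max0_concat]
    rw [show 1 + m = m + 1 by omega]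
    have hidx : (s : Int) + ((m : Int) + 1) - 1 = ((s + m : Nat) : Int) := by push_cast; ring
    rw [hidx, PySem.List.pyGetD_natCast]
    have hseg : max (segMax arr s (s + m)) (arr.getD (s + m) 0) = segMax arr s (s + (m + 1)) := by
      rw [show s + (m + 1) = (s + m) + 1 by omega]
      exact (segMax_right arr s (s + m) (by omega) (by omega)).symm
    show (_, _) = (_, _)
    rw [Prod.mk.injEq]
    refine ⟨hseg, ?_⟩
    show max (max0 ((List.range' 1 m).map
        (fun f => segMax arr s (s + f) * (f : Int) + solveB arr k fuel (((s + f : Nat)) : Int))))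
        (max (segMax arr s (s + m)) (arr.getD (s + m) 0) * ((m : Int) + 1)
          + solveB arr k fuel ((s : Int) + ((m : Int) + 1)))
      = max (max0 ((List.range' 1 m).map
        (fun f => segMax arr s (s + f) * (f : Int) + solveB arr k fuel (((s + f : Nat)) : Int))))
        (segMax arr s (s + (m + 1)) * ((m + 1 : Nat) : Int) + solveB arr k fuel (((s + (m + 1) : Nat)) : Int))
    rw [hseg]
    push_cast
    ring_nf

lemma solveB_eq_opt (arr : List Int) (k : Int) (hk : 0 ≤ k) :
    ∀ (fuel : Nat) (s : Nat), s ≤ arr.length → arr.length - s < fuel →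
    solveB arr k fuel (s : Int) = OptV arr k s arr.length := by
  intro fuel
  induction fuel with
  | zero => intro s _ h; omega
  | succ fuel ih =>
    intro s hs hf
    show ((PySem.List.pyRange 1 (min k (PySem.List.len arr - (s : Int)) + 1) 1).foldl
      (fun (st : Int × Int) l =>
        let currMax := max st.1 (PySem.List.pyGetD arr ((s : Int) + l - 1) 0)
        let best := max st.2 (currMax * l + solveB arr k fuel ((s : Int) + l))
        (currMax, best)) (0, 0)).2 = OptV arr k s arr.length
    rw [PySem.List.len_eq]
    set M := (min k ((arr.length : Int) - (s : Int))).toNat with hM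
    have hMI : (M : Int) ≤ (arr.length : Int) - (s : Int) := by omega
    rw [show min k ((arr.length : Int) - (s : Int)) + 1 = (M : Int) + 1 by omega]
    have hmap : (List.range' 1 M).map
        (fun f => segMax arr s (s + f) * (f : Int) + solveB arr k fuel (((s + f : Nat)) : Int))
        = (List.range' 1 M).map
        (fun f => segMax arr s (s + f) * (f : Int) + OptV arr k (s + f) arr.length) := by
      apply List.map_congr_left
      intro f hf1
      rw [List.mem_range'_1] at hf1
      rw [ih (s + f) (by omega) (by omega)]
    rw [innerB arr k fuel s M (by omega), hmap,
      opt_firstseg arr k s arr.length, ← hM]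

lemma portB_eq_opt (arr : List Int) (k : Int) (hk : 0 ≤ k) :
    maxSumSpaceOpt_alt arr k = OptV arr k 0 arr.length := by
  unfold maxSumSpaceOpt_alt
  rw [show (0 : Int) = ((0 : Nat) : Int) by norm_num]
  exact solveB_eq_opt arr k hk (arr.length + 1) 0 (by omega) (by omega)

-- ===== VERDICT (by name: the statement is the Claim_ definition above) =====
theorem maxSumSpaceOpt_spec : Claim_equal_maxSumSpaceOpt := by
  intro arr k _ hk
  unfold Spec_maxSumSpaceOpt
  rw [portA_eq_gfun arr k hk, portB_eq_opt arr k hk, gfun_eq_opt arr k arr.length]
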